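/- GENERATED by mk_final_copies.py from the proof of the farm's unit `inverse_mdct.8` (farm:inverse_mdct.8.1: Lemmas.lean) as the
   re-elaboration sweep compiled it — do not edit. -/
import Asan.CheckWalk
import Vorbis.Spec.MdctUse
import Vorbis.Spec.Units.inverse_mdct_8

open X86 X86.User Asan Vorbis Vorbis.Spec

set_option maxRecDepth 4000
set_option maxHeartbeats 4000000

namespace Vorbis.Spec.inverse_mdct_8

variable {others : List Obj} {frames : List (Nat × FrameLayout)} {len : Nat} {A : Arena} {stored room : Int}
  {ysz : Nat → Nat} {k c : Nat} {ue : State} {u₀ : State} {ret : Word}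

/-- **The frame rule of one iteration of the step-4-5-6 loop** (0x1099b9 … 0x109ad6): the iteration wrote the return addresses of
its eighteen check calls (`[rsp − 8, rsp)` below the steady stack pointer, `ue.rsp − 192`), the table pointer `q[rbp−40H]`
(`ue.rsp − 72`) and floats of the temp block. Everything else the loop invariant says of the memory — `Body`, the buffer slots,
the two slots of segment 3, `q[rbp−50H]`, `q[rbp−58H]` — is carried from the head state `v` to the state `w` at the back edge. -/
theorem carry_back {v w : State}
    (hb : inverse_mdct.Body u₀ others frames len A stored room ysz k c ue ret v)
    (hsBuf : inverse_mdct.SlotsBuf ue v) (hsS2 : inverse_mdct.SlotsS2 ue v)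
    (hd1 : v.mem.readLE (ue.reg .rsp - 88) 8 + 16 = inverse_mdct.tmp A ue + 4 * (inverse_mdct.n ue / 2))
    (hoff : v.mem.readLE (ue.reg .rsp - 96) 8 + 16 = 4 * (inverse_mdct.n ue / 2))
    (hs : Mem.SameExcept
      [⟨(ue.reg .rsp).toNat - 192, (ue.reg .rsp).toNat - 184⟩,
       ⟨(ue.reg .rsp).toNat - 72, (ue.reg .rsp).toNat - 64⟩,
       ⟨inverse_mdct.tmp A ue, inverse_mdct.tmp A ue + 2 * inverse_mdct.n ue⟩] v.mem w.mem)
    (hcode : CodeOK u₀ w.mem) (habi : abiInv w)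
    (hrbp : w.reg .rbp = ue.reg .rsp - 8) (hrsp : w.reg .rsp = ue.reg .rsp - 184) :
    inverse_mdct.Body u₀ others frames len A stored room ysz k c ue ret w ∧
    inverse_mdct.SlotsBuf ue w ∧ inverse_mdct.SlotsS2 ue w ∧
    w.mem.readLE (ue.reg .rsp - 88) 8 + 16 = inverse_mdct.tmp A ue + 4 * (inverse_mdct.n ue / 2) ∧
    w.mem.readLE (ue.reg .rsp - 96) 8 + 16 = 4 * (inverse_mdct.n ue / 2) := by
  have hp := hb.pre
  have hroom := hb.entry.room
  have htop := hb.entry.top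
  simp only [vspec, conv_stackLo, conv_stackHi] at hroom htop
  have hr := hp.tmp_range
  have hAR1 := hp.ado.ok.AR1
  have hAR1x := hp.ado.ok.AR1x
  have hAR2 := hp.ado.ok.AR2
  have hN := hp.isBlocksize.facts
  -- a read off the three windows: a stack slot that is neither a check's return address nor the table pointer
  have key : ∀ (a : Word) (n : Nat),
      (a.toNat + n ≤ (ue.reg .rsp).toNat - 192 ∨ (ue.reg .rsp).toNat - 184 ≤ a.toNat) →
      (a.toNat + n ≤ (ue.reg .rsp).toNat - 72 ∨ (ue.reg .rsp).toNat - 64 ≤ a.toNat) →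
      0x700000 ≤ a.toNat → a.toNat + n ≤ 0x800000 → w.mem.readLE a n = v.mem.readLE a n := by
    intro a n h1 h2 h3 h4
    apply hs.readLE a n (by omega)
    intro x hx
    simp only [List.mem_cons, List.mem_nil_iff, or_false] at hx
    rcases hx with rfl | rfl | rfl
    · exact h1
    · exact h2
    · simp only []
      omega
  -- the stores as `Body.carry` takes them
  have hs' : Mem.SameExcept
      [⟨(ue.reg .rsp).toNat - 368, (ue.reg .rsp).toNat⟩,
       ⟨inverse_mdct.buf ue, inverse_mdct.buf ue + 4 * inverse_mdct.n ue⟩,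
       ⟨inverse_mdct.tmp A ue, inverse_mdct.tmp A ue + 2 * inverse_mdct.n ue⟩] v.mem w.mem := by
    apply hs.mono
    intro x hx a ha1 ha2
    simp only [List.mem_cons, List.mem_nil_iff, or_false] at hx
    rcases hx with rfl | rfl | rfl
    · refine ⟨_, List.mem_cons_self, ?_, ?_⟩
      · simp only [] at ha1 ⊢
        omega
      · simp only [] at ha2 ⊢
        omega
    · refine ⟨_, List.mem_cons_self, ?_, ?_⟩
      · simp only [] at ha1 ⊢
        omega
      · simp only [] at ha2 ⊢
        omega
    · exact ⟨_, List.mem_cons_of_mem _ (List.mem_cons_of_mem _ List.mem_cons_self), ha1, ha2⟩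
  refine ⟨?_, ⟨?_, ?_, ?_⟩, ⟨?_, ?_⟩, ?_, ?_⟩
  · refine hb.carry hs' hcode habi hrbp hrsp ?_ ?_ ?_ ?_ ?_ ?_ ?_ ?_ ?_ ?_ ?_
    · rw [key _ _ (by u_omega) (by u_omega) (by u_omega) (by u_omega)]
      exact hb.retSlot
    · rw [key _ _ (by u_omega) (by u_omega) (by u_omega) (by u_omega)]
      exact hb.rbpSlot
    · rw [key _ _ (by u_omega) (by u_omega) (by u_omega) (by u_omega)]
      exact hb.r15Slot
    · rw [key _ _ (by u_omega) (by u_omega) (by u_omega) (by u_omega)]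
      exact hb.r14Slot
    · rw [key _ _ (by u_omega) (by u_omega) (by u_omega) (by u_omega)]
      exact hb.r13Slot
    · rw [key _ _ (by u_omega) (by u_omega) (by u_omega) (by u_omega)]
      exact hb.r12Slot
    · rw [key _ _ (by u_omega) (by u_omega) (by u_omega) (by u_omega)]
      exact hb.rbxSlot
    · rw [key _ _ (by u_omega) (by u_omega) (by u_omega) (by u_omega)]
      exact hb.fSlot
    · rw [key _ _ (by u_omega) (by u_omega) (by u_omega) (by u_omega)]
      exact hb.btSlot
    · rw [key _ _ (by u_omega) (by u_omega) (by u_omega) (by u_omega)]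
      exact hb.saveSlot
    · rw [key _ _ (by u_omega) (by u_omega) (by u_omega) (by u_omega)]
      exact hb.vSlot
  · rw [key _ _ (by u_omega) (by u_omega) (by u_omega) (by u_omega)]
    exact hsBuf.uSlot
  · rw [key _ _ (by u_omega) (by u_omega) (by u_omega) (by u_omega)]
    exact hsBuf.nSlot
  · rw [key _ _ (by u_omega) (by u_omega) (by u_omega) (by u_omega)]
    exact hsBuf.uMidSlot
  · rw [key _ _ (by u_omega) (by u_omega) (by u_omega) (by u_omega)]
    exact hsS2.n2x4m32Slot
  · rw [key _ _ (by u_omega) (by u_omega) (by u_omega) (by u_omega)]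
    exact hsS2.n4x4Slot
  · rw [key _ _ (by u_omega) (by u_omega) (by u_omega) (by u_omega)]
    exact hd1
  · rw [key _ _ (by u_omega) (by u_omega) (by u_omega) (by u_omega)]
    exact hoff

/-- `movzx r32, WORD PTR [m]` of a value below `2 ^ 16`: the register holds the number (the form `u_omega` needs as a fact). -/
theorem zx16 (x : Nat) (h : x < 65536) : (Word.ofBV (BitVec.zeroExtend 32 (BitVec.ofNat 16 x))).toNat = x := by
  rw [Vorbis.toNat_ofBV32, BitVec.toNat_setWidth, BitVec.toNat_ofNat]
  omega

/-- `movsxd r64, DWORD PTR [m]` of a small non-negative value: the register holds the number. -/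
theorem sx32 (x : Nat) (h : x < 2 ^ 31) : (Word.ofBV (BitVec.signExtend 64 (BitVec.ofNat 32 x))).toNat = x := by
  rw [toNat_sext32 _ (by rw [toNat_ofNat32 _ (by omega)]; exact h), toNat_ofNat32 _ (by omega)]

/-- **An entry of the bit-reverse table read in the middle of an iteration** is the entry of the loop head's memory: the table
is an allocated block, off the stack (`offStack`) and off the temp block (`offGap`), so none of the iteration's three windows
meets it. -/
theorem table_read {v s : State}
    (hb : inverse_mdct.Body u₀ others frames len A stored room ysz k c ue ret v)
    (hs : Mem.SameExcept
      [⟨(ue.reg .rsp).toNat - 192, (ue.reg .rsp).toNat - 184⟩,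
       ⟨(ue.reg .rsp).toNat - 72, (ue.reg .rsp).toNat - 64⟩,
       ⟨inverse_mdct.tmp A ue, inverse_mdct.tmp A ue + 2 * inverse_mdct.n ue⟩] v.mem s.mem)
    (a : Word) (hlo : inverse_mdct.tabR ue ≤ a.toNat)
    (hhi : a.toNat + 2 ≤ inverse_mdct.tabR ue + inverse_mdct.n ue / 4) :
    s.mem.readLE a 2 = v.mem.readLE a 2 := by
  have hp := hb.pre
  have hroom := hb.entry.room
  have htop := hb.entry.top
  simp only [vspec, conv_stackLo, conv_stackHi] at hroom htop
  have hr := hp.tmp_range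
  have hRin := hp.ok.inside _ hp.tabR_blk
  have hRS := hp.offStack _ hp.tabR_blk
  have hRT := hp.blk_off_tmp hp.tabR_blk
  simp only [vblock] at hRin hRS hRT
  apply hs.readLE a 2 (by omega)
  intro x hx
  simp only [List.mem_cons, List.mem_nil_iff, or_false] at hx
  rcases hx with rfl | rfl | rfl <;> simp only [] <;> omega

/-- The temp block lies off the stack region (it is inside the arena: AR1x). -/
theorem tmp_off_stack (hp : inverse_mdct.Pre others frames len A stored room ysz k c ue) :
    inverse_mdct.tmp A ue + 2 * inverse_mdct.n ue ≤ 0x700000 ∨ 0x800000 ≤ inverse_mdct.tmp A ue := by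
  have hr := hp.tmp_range
  have hAR1x := hp.ado.ok.AR1x
  have hAR2 := hp.ado.ok.AR2
  omega

end Vorbis.Spec.inverse_mdct_8
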